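-- pv_equiv track=rewrite | github.com/kylejones200/predictive-maintenance-with-time-series-in-python-using-pca-statistics-and-lstms | predictive_maintenance_RUL.py | get_transitions
-- ===== SOURCE A (Python) =====
-- def get_transitions(preds, min_gap=3):
--     transitions = []
--     last_idx = -min_gap
--     for i in range(1, len(preds)):
--         if preds[i] != preds[i - 1] and (i - last_idx) >= min_gap:
--             transitions.append((i, preds[i - 1], preds[i]))
--             last_idx = i
--     return transitions
-- ===== SOURCE B (Python) =====
-- def get_transitions(preds, min_gap=3):
--     # Skip-ahead scan: after emitting a transition at index i, jump the scan
--     # pointer straight to i + min_gap (changes in between can never be kept),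
--     # so no last-accepted index and no gap test are needed at all.
--     out = []
--     n = len(preds)
--     i = 1
--     while i < n:
--         if preds[i] != preds[i - 1]:
--             out.append((i, preds[i - 1], preds[i]))
--             i += max(min_gap, 1)
--         else:
--             i += 1
--     return out
-- ===== Notes on version B (the rewrite author's own statement) =====
-- stated objective: faster
-- what changed: Replaces A's gate-per-index loop (last_idx state and an i-last_idx>=min_gap test on every index) with a skip-ahead scanner: a while loop with variable stride that, on emitting a transition at i, jumps the pointer straight to i+min_gap, so no last-accepted index and no per-index gap comparison exist.
import Mathlib
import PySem

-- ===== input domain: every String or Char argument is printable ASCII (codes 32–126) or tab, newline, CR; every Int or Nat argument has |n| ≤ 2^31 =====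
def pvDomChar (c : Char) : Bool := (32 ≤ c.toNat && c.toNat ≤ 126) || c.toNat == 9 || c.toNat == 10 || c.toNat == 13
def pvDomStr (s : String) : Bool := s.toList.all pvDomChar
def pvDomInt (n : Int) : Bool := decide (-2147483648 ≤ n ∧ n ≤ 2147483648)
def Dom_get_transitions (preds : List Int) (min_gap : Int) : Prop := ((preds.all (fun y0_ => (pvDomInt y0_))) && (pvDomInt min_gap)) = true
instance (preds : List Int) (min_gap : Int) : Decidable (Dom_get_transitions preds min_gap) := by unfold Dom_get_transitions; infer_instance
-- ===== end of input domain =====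

-- B replaces A's last_idx gate with a skip-ahead while loop that jumps min_gap indices past each emitted transition; return values are proved equal.

-- ===== PORT A =====
-- A's loop body: if preds[i] != preds[i-1] and i - last_idx >= min_gap, append and update last_idx.
def getTransStepA (preds : List Int) (min_gap : Int)
    (s : List (Int × Int × Int) × Int) (i : Int) : List (Int × Int × Int) × Int :=
  if PySem.List.pyGetD preds i 0 ≠ PySem.List.pyGetD preds (i - 1) 0 ∧ i - s.2 ≥ min_gap then
    (s.1 ++ [(i, PySem.List.pyGetD preds (i - 1) 0, PySem.List.pyGetD preds i 0)], i)
  else s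

def get_transitions (preds : List Int) (min_gap : Int) : List (Int × Int × Int) :=
  ((PySem.List.pyRange 1 preds.length 1).foldl (getTransStepA preds min_gap)
    ([], -min_gap)).1

-- ===== PORT B =====
-- B's while loop: scan i upward; on a change, emit it and jump i by max(min_gap, 1), else step by 1.
def getTransLoopB (preds : List Int) (min_gap : Int) (n i : Int) : List (Int × Int × Int) :=
  if _h : i < n then
    if PySem.List.pyGetD preds i 0 ≠ PySem.List.pyGetD preds (i - 1) 0 then
      (i, PySem.List.pyGetD preds (i - 1) 0, PySem.List.pyGetD preds i 0)
        :: getTransLoopB preds min_gap n (i + max min_gap 1)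
    else getTransLoopB preds min_gap n (i + 1)
  else []
termination_by (n - i).toNat
decreasing_by all_goals omega

def get_transitions_alt (preds : List Int) (min_gap : Int) : List (Int × Int × Int) :=
  getTransLoopB preds min_gap preds.length 1

-- ===== PRECONDITION & SPEC =====
def Spec_get_transitions (preds : List Int) (min_gap : Int) (out : List (Int × Int × Int)) : Prop := out = get_transitions_alt preds min_gap
instance (preds : List Int) (min_gap : Int) (out : List (Int × Int × Int)) : Decidable (Spec_get_transitions preds min_gap out) := by unfold Spec_get_transitions; infer_instance

-- ===== CLAIM (what is proved, stated in full; the proofs are below) =====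
def Claim_equal_get_transitions : Prop := ∀ (preds : List Int) (min_gap : Int), Dom_get_transitions preds min_gap → Spec_get_transitions preds min_gap (get_transitions preds min_gap)

-- ===== LEMMAS AND PROOFS =====
-- A's gate rejects every index below last + min_gap, so its fold may fast-forward there
lemma foldA_skip (preds : List Int) (min_gap n : Int) : ∀ (k : Nat) (j : Int) (acc : List (Int × Int × Int)) (last : Int),
    (last + min_gap - j).toNat = k →
    (PySem.List.pyRange j n 1).foldl (getTransStepA preds min_gap) (acc, last)
      = (PySem.List.pyRange (max j (last + min_gap)) n 1).foldl (getTransStepA preds min_gap) (acc, last) := by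
  intro k
  induction k with
  | zero =>
    intro j acc last hk
    have : max j (last + min_gap) = j := by omega
    rw [this]
  | succ k ih =>
    intro j acc last hk
    have hj : j < last + min_gap := by omega
    by_cases hn : j < n
    · rw [PySem.List.pyRange_one_cons hn]
      simp only [List.foldl_cons]
      have hstep : getTransStepA preds min_gap (acc, last) j = (acc, last) := by
        simp only [getTransStepA]
        rw [if_neg]; rintro ⟨-, hg⟩; omega
      rw [hstep, ih (j + 1) acc last (by omega)]
      have : max (j + 1) (last + min_gap) = max j (last + min_gap) := by omega
      rw [this]
    · have h1 : PySem.List.pyRange j n 1 = [] := by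
        simp [PySem.List.pyRange_one, show (n - j).toNat = 0 by omega]
      have h2 : PySem.List.pyRange (max j (last + min_gap)) n 1 = [] := by
        simp [PySem.List.pyRange_one, show (n - max j (last + min_gap)).toNat = 0 by omega]
      rw [h1, h2]

-- main invariant: from any state whose last index is at least min_gap behind the scan point,
-- A's fold appends exactly what B's skip-ahead loop produces
lemma foldA_eq_loopB (preds : List Int) (min_gap n : Int) : ∀ (k : Nat) (i : Int) (acc : List (Int × Int × Int)) (last : Int),
    (n - i).toNat = k → last + min_gap ≤ i →
    ((PySem.List.pyRange i n 1).foldl (getTransStepA preds min_gap) (acc, last)).1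
      = acc ++ getTransLoopB preds min_gap n i := by
  intro k
  induction k using Nat.strong_induction_on with
  | _ k ih =>
    intro i acc last hk hlast
    by_cases hn : i < n
    · rw [PySem.List.pyRange_one_cons hn, getTransLoopB]
      simp only [List.foldl_cons, dif_pos hn]
      by_cases hch : PySem.List.pyGetD preds i 0 ≠ PySem.List.pyGetD preds (i - 1) 0
      · have hstep : getTransStepA preds min_gap (acc, last) i
            = (acc ++ [(i, PySem.List.pyGetD preds (i - 1) 0, PySem.List.pyGetD preds i 0)], i) := by
          simp only [getTransStepA]
          rw [if_pos ⟨hch, by omega⟩]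
        rw [hstep, if_pos hch]
        rw [foldA_skip preds min_gap n (i + min_gap - (i + 1)).toNat (i + 1) _ i rfl]
        have hmax : max (i + 1) (i + min_gap) = i + max min_gap 1 := by omega
        rw [hmax, ih (n - (i + max min_gap 1)).toNat (by omega) _ _ i rfl (by omega)]
        simp
      · have hstep : getTransStepA preds min_gap (acc, last) i = (acc, last) := by
          simp only [getTransStepA]
          rw [if_neg]; rintro ⟨h, -⟩; exact hch h
        rw [hstep, if_neg hch]
        exact ih (n - (i + 1)).toNat (by omega) _ _ last rfl (by omega)
    · have h1 : PySem.List.pyRange i n 1 = [] := by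
        simp [PySem.List.pyRange_one, show (n - i).toNat = 0 by omega]
      rw [h1, getTransLoopB]
      simp [hn]

-- ===== VERDICT (by name: the statement is the Claim_ definition above) =====
theorem get_transitions_spec : Claim_equal_get_transitions := by
  intro preds min_gap _
  unfold Spec_get_transitions get_transitions get_transitions_alt
  have := foldA_eq_loopB preds min_gap preds.length ((preds.length : Int) - 1).toNat 1 [] (-min_gap) rfl (by omega)
  simpa using this
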